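-- pv_equiv track=rewrite | github.com/keglevelmonitor/keglevelpico | src/main_kivy.py | _generate_next_keg_title
-- ===== SOURCE A (Python) =====
-- def _generate_next_keg_title(all_kegs):
--     """
--     Finds the first available 'Keg {nn}' title by looking for gaps
--     in the existing numbering sequence.
--     """
--     existing_numbers = set()
--
--     for k in all_kegs:
--         title = k.get('title', '')
--         # Check if title follows standard "Keg " format
--         if title.startswith("Keg "):
--             try:
--                 # Extract the number part
--                 num_str = title[4:].strip()
--                 if num_str.isdigit():
--                     existing_numbers.add(int(num_str))
--             except ValueError:
--                 continue
--
--     # Start looking from 1 upwards for the first empty slot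
--     next_num = 1
--     while next_num in existing_numbers:
--         next_num += 1
--
--     return f"Keg {next_num:02}"
-- ===== SOURCE B (Python) =====
-- def _parse_keg_number(keg):
--     """Parse 'Keg NN' title into its number, or None if not of that form."""
--     title = keg.get('title', '')
--     if not title.startswith("Keg "):
--         return None
--     s = title[4:].strip()
--     return int(s) if s.isdigit() else None
--
-- def _generate_next_keg_title(all_kegs):
--     """
--     First available 'Keg {nn}' title: extract the numbers with a helper,
--     then sweep the sorted distinct numbers for the first gap from 1.
--     """
--     nums = sorted({n for n in map(_parse_keg_number, all_kegs) if n is not None})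
--     expected = 1
--     for n in nums:
--         if n == expected:
--             expected += 1
--         elif n > expected:
--             break
--         # n < expected (e.g. 'Keg 0'): skip
--     return f"Keg {expected:02}"
-- ===== Notes on version B (the rewrite author's own statement) =====
-- stated objective: alternative
-- what changed: Parsing is factored into a separate helper mapped over the kegs (filter-map instead of A's in-loop set mutation), and A's unbounded while-loop of set membership probes for 1,2,3,... is replaced by a single forward sweep over the sorted distinct parsed numbers that tracks the next expected number and stops at the first gap.
import Mathlib
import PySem

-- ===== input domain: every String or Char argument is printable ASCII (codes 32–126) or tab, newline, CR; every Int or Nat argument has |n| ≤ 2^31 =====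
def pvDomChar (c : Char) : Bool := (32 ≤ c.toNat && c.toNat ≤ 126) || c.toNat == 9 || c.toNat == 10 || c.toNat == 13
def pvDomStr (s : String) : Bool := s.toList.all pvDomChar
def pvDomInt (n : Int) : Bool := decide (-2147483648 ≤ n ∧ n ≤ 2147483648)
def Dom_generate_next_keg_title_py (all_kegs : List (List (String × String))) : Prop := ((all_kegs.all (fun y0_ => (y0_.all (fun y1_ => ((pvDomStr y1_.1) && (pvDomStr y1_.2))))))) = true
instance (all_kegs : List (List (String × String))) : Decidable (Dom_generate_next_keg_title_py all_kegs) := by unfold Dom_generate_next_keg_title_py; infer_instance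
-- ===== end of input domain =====

-- B factors parsing into a helper filter-mapped over the kegs and replaces A's
-- while-loop of set membership probes by a sweep over the sorted distinct numbers
-- (alternative decomposition, same exact return value).


-- ===== PORT A =====
-- f"Keg {n:02}"  (format spec '02' = zero-pad to width 2; the same f-string appears in both Pythons)
def kegFmt (n : Int) : String :=
  PySem.Str.join "" ["Keg ", PySem.Str.zfill (PySem.Int.toStr n) 2]

-- the 'while next_num in existing_numbers: next_num += 1' loop; fuel only makes it
-- total (each successful probe consumes a distinct member, so |existing|+1 steps suffice)
def kegWhile (s : List Int) (next_num : Int) : Nat → Int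
  | 0 => next_num
  | fuel + 1 => if next_num ∈ s then kegWhile s (next_num + 1) fuel else next_num

def generate_next_keg_title_py (all_kegs : List (List (String × String))) : String :=
  let existing_numbers : PySem.Set Int := all_kegs.foldl (fun acc k =>
    let title := (PySem.Dict.ofList k).getD "title" ""
    if PySem.Str.startswith title "Keg " then
      let num_str := PySem.Str.strip (PySem.Str.slice title (some 4) none)
      if PySem.Str.strIsdigit num_str then
        match PySem.Int.ofStr? num_str with     -- try: int(num_str)
        | some n => PySem.Set.add acc n
        | none => acc                            -- except ValueError: continue
      else acc
    else acc) PySem.Set.empty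
  kegFmt (kegWhile existing_numbers 1 (existing_numbers.length + 1))

-- ===== PORT B =====
-- _parse_keg_number
def parseKegNumber (keg : List (String × String)) : Option Int :=
  let title := (PySem.Dict.ofList keg).getD "title" ""
  if PySem.Str.startswith title "Keg " = false then none
  else
    let s := PySem.Str.strip (PySem.Str.slice title (some 4) none)
    if PySem.Str.strIsdigit s then PySem.Int.ofStr? s else none

-- the 'for n in nums' sweep with early break
def kegSweep (expected : Int) : List Int → Int
  | [] => expected
  | n :: rest =>
    if n = expected then kegSweep (expected + 1) rest
    else if expected < n then expected
    else kegSweep expected rest                  -- n < expected: skip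

def generate_next_keg_title_py_alt (all_kegs : List (List (String × String))) : String :=
  -- sorted({n for n in map(_parse_keg_number, all_kegs) if n is not None})
  let nums : List Int :=
    PySem.List.sorted (PySem.Set.ofList (all_kegs.filterMap parseKegNumber)) (fun x => x) false
  kegFmt (kegSweep 1 nums)

-- ===== PRECONDITION & SPEC =====
def Spec_generate_next_keg_title_py (all_kegs : List (List (String × String))) (out : String) : Prop := out = generate_next_keg_title_py_alt all_kegs
instance (all_kegs : List (List (String × String))) (out : String) : Decidable (Spec_generate_next_keg_title_py all_kegs out) := by unfold Spec_generate_next_keg_title_py; infer_instance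

-- ===== CLAIM (what is proved, stated in full; the proofs are below) =====
def Claim_equal_generate_next_keg_title_py : Prop := ∀ (all_kegs : List (List (String × String))), Dom_generate_next_keg_title_py all_kegs → Spec_generate_next_keg_title_py all_kegs (generate_next_keg_title_py all_kegs)

-- ===== LEMMAS AND PROOFS =====

-- A's loop body, rephrased through the parse helper
theorem keg_step_eq (acc : PySem.Set Int) (k : List (String × String)) :
    (let title := (PySem.Dict.ofList k).getD "title" ""
     if PySem.Str.startswith title "Keg " then
       let num_str := PySem.Str.strip (PySem.Str.slice title (some 4) none)
       if PySem.Str.strIsdigit num_str then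
         match PySem.Int.ofStr? num_str with
         | some n => PySem.Set.add acc n
         | none => acc
       else acc
     else acc)
    = (match parseKegNumber k with
       | some n => PySem.Set.add acc n
       | none => acc) := by
  unfold parseKegNumber
  dsimp only
  cases h1 : PySem.Str.startswith ((PySem.Dict.ofList k).getD "title" "") "Keg " with
  | false => rfl
  | true =>
    cases h2 : PySem.Str.strIsdigit
        (PySem.Str.strip (PySem.Str.slice ((PySem.Dict.ofList k).getD "title" "") (some 4) none)) with
    | false => rfl
    | true =>
      cases PySem.Int.ofStr?
          (PySem.Str.strip (PySem.Str.slice ((PySem.Dict.ofList k).getD "title" "") (some 4) none)) <;> rfl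

-- folding the match step collects exactly set(filterMap parseKegNumber)
theorem keg_fold_match (l : List (List (String × String))) (a : List Int) :
    l.foldl (fun acc k =>
      match parseKegNumber k with
      | some n => PySem.Set.add acc n
      | none => acc) (PySem.Set.ofList a)
    = PySem.Set.ofList (a ++ l.filterMap parseKegNumber) := by
  induction l generalizing a with
  | nil => simp
  | cons k l ih =>
    simp only [List.foldl_cons, List.filterMap_cons]
    cases hv : parseKegNumber k with
    | none => simpa using ih a
    | some n =>
      dsimp only
      rw [← PySem.Set.ofList_append_singleton, ih (a ++ [n])]
      simp

-- A's set accumulator is set(filterMap parseKegNumber)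
theorem keg_set_eq_ofList (l : List (List (String × String))) (a : List Int) :
    l.foldl (fun acc k =>
      let title := (PySem.Dict.ofList k).getD "title" ""
      if PySem.Str.startswith title "Keg " then
        let num_str := PySem.Str.strip (PySem.Str.slice title (some 4) none)
        if PySem.Str.strIsdigit num_str then
          match PySem.Int.ofStr? num_str with
          | some n => PySem.Set.add acc n
          | none => acc
        else acc
      else acc) (PySem.Set.ofList a)
    = PySem.Set.ofList (a ++ l.filterMap parseKegNumber) := by
  rw [show (fun (acc : PySem.Set Int) (k : List (String × String)) =>
      let title := (PySem.Dict.ofList k).getD "title" ""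
      if PySem.Str.startswith title "Keg " then
        let num_str := PySem.Str.strip (PySem.Str.slice title (some 4) none)
        if PySem.Str.strIsdigit num_str then
          match PySem.Int.ofStr? num_str with
          | some n => PySem.Set.add acc n
          | none => acc
        else acc
      else acc)
    = (fun acc k =>
        match parseKegNumber k with
        | some n => PySem.Set.add acc n
        | none => acc) from funext fun acc => funext fun k => keg_step_eq acc k]
  exact keg_fold_match l a

-- strict probe counting: a successful probe strictly shrinks the members ≥ next value
theorem keg_filter_lt (s : List Int) (n : Int) (h : n ∈ s) :
    (s.filter (fun m => decide (n + 1 ≤ m))).length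
      < (s.filter (fun m => decide (n ≤ m))).length := by
  induction s with
  | nil => cases h
  | cons x s ih =>
    rcases List.mem_cons.mp h with heq | hx
    · subst heq
      simp only [List.filter_cons]
      have h1 : (decide (n ≤ n)) = true := by simp
      have h2 : (decide (n + 1 ≤ n)) = false := by simp
      rw [h1, h2]
      have mono : (s.filter (fun m => decide (n + 1 ≤ m))).length
          ≤ (s.filter (fun m => decide (n ≤ m))).length := by
        apply List.Sublist.length_le
        apply List.monotone_filter_right
        intro m hm
        simp only [decide_eq_true_eq] at hm ⊢; omega
      simpa using Nat.lt_succ_of_le mono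
    · have := ih hx
      simp only [List.filter_cons]
      split <;> split <;> simp_all <;> omega

-- kegWhile with enough fuel returns the least value ≥ start outside s
theorem kegWhile_spec (s : List Int) :
    ∀ (fuel : Nat) (n : Int), (s.filter (fun m => decide (n ≤ m))).length < fuel →
      n ≤ kegWhile s n fuel ∧ kegWhile s n fuel ∉ s ∧
        ∀ m, n ≤ m → m < kegWhile s n fuel → m ∈ s := by
  intro fuel
  induction fuel with
  | zero => intro n h; omega
  | succ fuel ih =>
    intro n h
    by_cases hn : n ∈ s
    · have hlt := keg_filter_lt s n hn
      have ⟨h1, h2, h3⟩ := ih (n + 1) (by omega)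
      refine ⟨?_, ?_, ?_⟩ <;> simp only [kegWhile, if_pos hn]
      · omega
      · exact h2
      · intro m hm1 hm2
        rcases eq_or_lt_of_le hm1 with rfl | h'
        · exact hn
        · exact h3 m (by omega) hm2
    · refine ⟨?_, ?_, ?_⟩ <;> simp only [kegWhile, if_neg hn]
      · omega
      · exact hn
      · intro m h1 h2; omega

-- kegSweep over a ≤-sorted list returns the least value ≥ start outside the list
theorem kegSweep_spec (xs : List Int) (hs : xs.Pairwise (· ≤ ·)) :
    ∀ e : Int, e ≤ kegSweep e xs ∧ kegSweep e xs ∉ xs ∧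
      ∀ m, e ≤ m → m < kegSweep e xs → m ∈ xs := by
  induction xs with
  | nil => intro e; refine ⟨le_refl e, by simp [kegSweep], ?_⟩; intro m h1 h2; simp [kegSweep] at h2; omega
  | cons x rest ih =>
    have hall := (List.pairwise_cons.mp hs).1
    have hrest := (List.pairwise_cons.mp hs).2
    intro e
    by_cases h2 : x = e
    · subst h2
      have ⟨a1, a2, a3⟩ := ih hrest (x + 1)
      have hstep : kegSweep x (x :: rest) = kegSweep (x + 1) rest := by
        simp [kegSweep]
      rw [hstep]
      refine ⟨by omega, ?_, ?_⟩
      · simp only [List.mem_cons, not_or]; exact ⟨by omega, a2⟩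
      · intro m hm1 hm2
        rcases eq_or_lt_of_le hm1 with rfl | h'
        · exact List.mem_cons_self
        · exact List.mem_cons_of_mem x (a3 m (by omega) hm2)
    · by_cases h1 : e < x
      · simp only [kegSweep, if_neg h2, if_pos h1]
        refine ⟨le_refl e, ?_, ?_⟩
        · simp only [List.mem_cons, not_or]
          refine ⟨fun h => h2 h.symm, fun hmem => ?_⟩
          have := hall _ hmem; omega
        · intro m hm1 hm2; omega
      · have ⟨a1, a2, a3⟩ := ih hrest e
        simp only [kegSweep, if_neg h2, if_neg h1]
        refine ⟨a1, ?_, ?_⟩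
        · simp only [List.mem_cons, not_or]; exact ⟨by omega, a2⟩
        · intro m hm1 hm2; exact List.mem_cons_of_mem x (a3 m hm1 hm2)

-- two "least value ≥ 1 outside the same member set" results are equal
theorem keg_least_unique (r1 r2 : Int) (P : Int → Prop)
    (h1 : ¬ P r1) (c1 : ∀ m, 1 ≤ m → m < r1 → P m) (g1 : 1 ≤ r1)
    (h2 : ¬ P r2) (c2 : ∀ m, 1 ≤ m → m < r2 → P m) (g2 : 1 ≤ r2) : r1 = r2 := by
  by_contra hne
  rcases lt_or_gt_of_ne hne with h | h
  · exact h1 (c2 r1 g1 h)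
  · exact h2 (c1 r2 g2 h)

-- ===== VERDICT (by name: the statement is the Claim_ definition above) =====
theorem generate_next_keg_title_py_spec : Claim_equal_generate_next_keg_title_py := by
  intro all_kegs _
  unfold Spec_generate_next_keg_title_py generate_next_keg_title_py generate_next_keg_title_py_alt
  simp only []
  rw [show (PySem.Set.empty : PySem.Set Int) = PySem.Set.ofList [] from rfl,
      keg_set_eq_ofList]
  simp only [List.nil_append]
  set S := PySem.Set.ofList (all_kegs.filterMap parseKegNumber) with hS
  set X := PySem.List.sorted S (fun x => x) false with hX
  have hmemX : ∀ m : Int, m ∈ X ↔ m ∈ S := by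
    intro m; rw [hX, PySem.List.mem_sorted]
  have hsorted : X.Pairwise (· ≤ ·) := PySem.List.sorted_pairwise S (fun x => x)
  have hA := kegWhile_spec S (S.length + 1) 1
      (Nat.lt_succ_of_le (List.length_filter_le _ _))
  have hB := kegSweep_spec X hsorted 1
  congr 1
  exact keg_least_unique _ _ (· ∈ S) hA.2.1 hA.2.2 hA.1
    (fun h => hB.2.1 ((hmemX _).mpr h))
    (fun m hm1 hm2 => (hmemX m).mp (hB.2.2 m hm1 hm2)) hB.1
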